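-- pv_equiv track=rewrite | github.com/charlesmjdana/Project-404 | fast.py | check
-- ===== SOURCE A (Python) =====
-- def check(line):
--     if len(line) == 0:
--         return False
--     i = 0
--     while (i < len(line)):
--         j = 0
--         if line[i] == 0:
--             return False
--         while (j < i):
--             if abs(line[i]) == abs(line[j]):
--                 return False
--             j = j + 1
--         i = i + 1
--     return True
-- ===== SOURCE B (Python) =====
-- def check(line):
--     if not line:
--         return False
--     if 0 in line:
--         return False
--     mags = sorted(abs(x) for x in line)
--     for a, b in zip(mags, mags[1:]):
--         if a == b:
--             return False
--     return True
-- ===== Notes on version B (the rewrite author's own statement) =====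
-- stated objective: alternative
-- what changed: Replaces A's nested left-to-right pairwise comparison with staged passes: a zero-membership scan, then sorting the absolute values and one linear scan comparing adjacent elements.
import Mathlib
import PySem

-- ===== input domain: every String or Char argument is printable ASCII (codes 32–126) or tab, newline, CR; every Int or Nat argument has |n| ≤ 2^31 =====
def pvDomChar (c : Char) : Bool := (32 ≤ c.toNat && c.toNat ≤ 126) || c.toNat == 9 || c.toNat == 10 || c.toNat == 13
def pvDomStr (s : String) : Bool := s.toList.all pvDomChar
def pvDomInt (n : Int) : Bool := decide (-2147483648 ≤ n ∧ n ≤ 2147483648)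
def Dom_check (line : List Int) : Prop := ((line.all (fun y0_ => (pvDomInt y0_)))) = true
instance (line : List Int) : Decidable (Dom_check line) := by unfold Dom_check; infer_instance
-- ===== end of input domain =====

-- B replaces A's nested pairwise scan with staged passes: a zero-membership scan,
-- then a sort of the absolute values and one linear scan over adjacent pairs.

-- ===== PORT A =====
-- inner 'while (j < i)' loop of A
def checkInner (line : List Int) (i j : Nat) : Bool :=
  if j < i then
    if |line.getD i 0| = |line.getD j 0| then false
    else checkInner line i (j + 1)
  else true
termination_by i - j

-- outer 'while (i < len(line))' loop of A
def checkOuter (line : List Int) (i : Nat) : Bool :=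
  if i < line.length then
    if line.getD i 0 = 0 then false
    else if checkInner line i 0 = false then false
    else checkOuter line (i + 1)
  else true
termination_by line.length - i

def check (line : List Int) : Bool :=
  if line.length = 0 then false else checkOuter line 0

-- ===== PORT B =====
-- the 'for a, b in zip(mags, mags[1:])' loop of B: scan adjacent pairs of the sorted list
def adjDistinct (mags : List Int) : Bool :=
  match mags with
  | a :: b :: rest => if a = b then false else adjDistinct (b :: rest)
  | _ => true

def check_alt (line : List Int) : Bool :=
  if line.isEmpty then false
  else if line.contains 0 then false
  else adjDistinct (PySem.List.sorted (line.map (fun x => |x|)) (fun x => x) false)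

-- ===== PRECONDITION & SPEC =====
def Spec_check (line : List Int) (out : Bool) : Prop := out = check_alt line
instance (line : List Int) (out : Bool) : Decidable (Spec_check line out) := by unfold Spec_check; infer_instance

-- ===== CLAIM (what is proved, stated in full; the proofs are below) =====
def Claim_equal_check : Prop := ∀ (line : List Int), Dom_check line → Spec_check line (check line)

-- ===== LEMMAS AND PROOFS =====

theorem checkInner_true_iff (line : List Int) (i j : Nat) :
    checkInner line i j = true ↔ ∀ k, j ≤ k → k < i → |line.getD i 0| ≠ |line.getD k 0| := by
  generalize hn : i - j = n
  induction n generalizing j with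
  | zero =>
    have hji : ¬ j < i := by omega
    rw [checkInner]; simp [hji]
    intro k hk hki; omega
  | succ n ih =>
    have hji : j < i := by omega
    rw [checkInner]; simp [hji, ih (j + 1) (by omega)]
    constructor
    · rintro ⟨hne, h⟩ k hk hki
      rcases Nat.eq_or_lt_of_le hk with rfl | h'
      · exact hne
      · exact h k h' hki
    · intro h
      exact ⟨h j le_rfl hji, fun k hk hki => h k (le_of_lt hk) hki⟩

theorem checkOuter_true_iff (line : List Int) (i : Nat) :
    checkOuter line i = true ↔
      ∀ k, i ≤ k → k < line.length →
        line.getD k 0 ≠ 0 ∧ ∀ j, j < k → |line.getD k 0| ≠ |line.getD j 0| := by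
  generalize hn : line.length - i = n
  induction n generalizing i with
  | zero =>
    have h : ¬ i < line.length := by omega
    rw [checkOuter, if_neg h]; simp
    intro k hk hki; omega
  | succ n ih =>
    have h : i < line.length := by omega
    rw [checkOuter, if_pos h]
    by_cases h1 : line.getD i 0 = 0
    · rw [if_pos h1]; simp
      exact ⟨i, le_rfl, h, fun hc => absurd h1 hc⟩
    · rw [if_neg h1]
      by_cases h2 : checkInner line i 0 = true
      · rw [if_neg (by simp [h2]), ih (i + 1) (by omega)]
        rw [checkInner_true_iff] at h2
        constructor
        · intro rest k hk hkl
          rcases Nat.eq_or_lt_of_le hk with rfl | h'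
          · exact ⟨h1, fun j hj => h2 j (Nat.zero_le j) hj⟩
          · exact rest k h' hkl
        · intro hall k hk hkl
          exact hall k (le_of_lt hk) hkl
      · have h2' : checkInner line i 0 = false := by
          cases hx : checkInner line i 0
          · rfl
          · exact absurd hx h2
        rw [if_pos h2']; simp
        rw [checkInner_true_iff] at h2
        push Not at h2
        obtain ⟨k, -, hk, hek⟩ := h2
        exact ⟨i, le_rfl, h, fun _ => ⟨k, hk, hek⟩⟩

-- A's outer-loop condition restated over list membership / Nodup of the abs image
theorem checkA_char (line : List Int) :
    (∀ k, 0 ≤ k → k < line.length →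
        line.getD k 0 ≠ 0 ∧ ∀ j, j < k → |line.getD k 0| ≠ |line.getD j 0|)
      ↔ (0 ∉ line) ∧ (line.map (fun x => |x|)).Nodup := by
  constructor
  · intro h
    refine ⟨?_, ?_⟩
    · intro hx
      obtain ⟨k, hk, he⟩ := List.mem_iff_getElem.mp hx
      have h1 := (h k (Nat.zero_le k) hk).1
      rw [List.getD_eq_getElem _ _ hk] at h1
      exact h1 he
    · rw [List.Nodup, List.pairwise_iff_getElem]
      intro i j hi hj hij
      simp only [List.getElem_map]
      have h2 := (h j (Nat.zero_le j) (by simpa using hj)).2 i hij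
      rw [List.getD_eq_getElem _ _ (by simpa using hj),
        List.getD_eq_getElem _ _ (lt_trans hij (by simpa using hj))] at h2
      exact fun he => h2 he.symm
  · rintro ⟨h0, hnd⟩ k _ hk
    have hmem : line.getD k 0 ∈ line := by
      rw [List.getD_eq_getElem _ _ hk]; exact List.getElem_mem hk
    refine ⟨fun he => h0 (he ▸ hmem), ?_⟩
    intro j hj
    have hjlen : j < line.length := lt_trans hj hk
    rw [List.Nodup, List.pairwise_iff_getElem] at hnd
    have := hnd j k (by simpa using hjlen) (by simpa using hk) hj
    simp only [List.getElem_map] at this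
    rw [List.getD_eq_getElem _ _ hk, List.getD_eq_getElem _ _ hjlen]
    exact fun he => this he.symm

theorem adjDistinct_true_iff (mags : List Int) :
    adjDistinct mags = true ↔ mags.IsChain (· ≠ ·) := by
  match mags with
  | [] => simp [adjDistinct]
  | [a] => simp [adjDistinct]
  | a :: b :: rest =>
    rw [adjDistinct, List.isChain_cons_cons]
    by_cases hab : a = b
    · simp [hab]
    · simp [hab, adjDistinct_true_iff (b :: rest)]

-- on a (≤)-sorted list, distinct adjacent elements ⇔ all elements distinct
theorem chain'_ne_iff_nodup (l : List Int) (hs : l.Pairwise (· ≤ ·)) :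
    l.IsChain (· ≠ ·) ↔ l.Nodup := by
  constructor
  · intro hc
    have hlt : l.IsChain (· < ·) := by
      induction l with
      | nil => exact List.isChain_nil
      | cons a t ih =>
        match t, hc, hs with
        | [], _, _ => exact List.isChain_singleton a
        | b :: r, hc, hs =>
          rw [List.isChain_cons_cons] at hc ⊢
          rw [List.pairwise_cons] at hs
          exact ⟨lt_of_le_of_ne (hs.1 b List.mem_cons_self) hc.1, ih hs.2 hc.2⟩
    exact (List.isChain_iff_pairwise.mp hlt).imp ne_of_lt
  · intro hnd
    exact List.Pairwise.isChain hnd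

theorem check_eq_alt (line : List Int) : check line = check_alt line := by
  cases hline : line with
  | nil => rfl
  | cons x rest =>
    rw [check, check_alt, if_neg (by simp), if_neg (by simp)]
    by_cases h0 : (0 : Int) ∈ x :: rest
    · rw [if_pos (by simpa using h0)]
      have : checkOuter (x :: rest) 0 ≠ true := by
        intro h
        rw [checkOuter_true_iff, checkA_char] at h
        exact h.1 h0
      simpa using this
    · rw [if_neg (by simpa using h0)]
      have hperm := PySem.List.sorted_perm ((x :: rest).map (fun x => |x|)) (fun x => x) false
      have hpw : (PySem.List.sorted ((x :: rest).map (fun x => |x|)) (fun x => x) false).Pairwise (· ≤ ·) := by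
        simpa using PySem.List.sorted_pairwise ((x :: rest).map (fun x => |x|)) (fun x => x)
      refine Bool.coe_iff_coe.mp ?_
      rw [checkOuter_true_iff, checkA_char, adjDistinct_true_iff,
        chain'_ne_iff_nodup _ hpw, hperm.nodup_iff]
      simp [h0]

-- ===== VERDICT (by name: the statement is the Claim_ definition above) =====
theorem check_spec : Claim_equal_check :=
  fun line _ => (check_eq_alt line)
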